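-- pv_equiv track=rewrite | github.com/AdityaK85/db-chatbot-ai | query_generator.py | validate_sql_safety
-- ===== SOURCE A (Python) =====
-- def validate_sql_safety(sql_query: str) -> bool:
--     """Validate that the SQL query is safe to execute"""
--     dangerous_keywords = [
--         'DROP', 'DELETE', 'INSERT', 'UPDATE', 'ALTER',
--         'CREATE', 'TRUNCATE', 'REPLACE', 'ATTACH', 'DETACH'
--     ]
--
--     sql_upper = sql_query.upper()
--
--     for keyword in dangerous_keywords:
--         if keyword in sql_upper:
--             return False
--
--     return True
-- ===== SOURCE B (Python) =====
-- _KEYWORDS = ('DROP', 'DELETE', 'INSERT', 'UPDATE', 'ALTER',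
--              'CREATE', 'TRUNCATE', 'REPLACE', 'ATTACH', 'DETACH')
--
--
-- def validate_sql_safety(sql_query: str) -> bool:
--     """Validate that the SQL query is safe to execute: one left-to-right scan,
--     testing at each position whether any dangerous keyword starts there."""
--     s = sql_query.upper()
--     return not any(s.startswith(_KEYWORDS, i) for i in range(len(s)))
-- ===== Notes on version B (the rewrite author's own statement) =====
-- stated objective: alternative
-- what changed: A scans the whole query once per keyword (ten independent substring searches with early return); B makes a single left-to-right pass over the uppercased query, testing at each position whether any keyword starts there via one tuple-argument startswith call.
import Mathlib
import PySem

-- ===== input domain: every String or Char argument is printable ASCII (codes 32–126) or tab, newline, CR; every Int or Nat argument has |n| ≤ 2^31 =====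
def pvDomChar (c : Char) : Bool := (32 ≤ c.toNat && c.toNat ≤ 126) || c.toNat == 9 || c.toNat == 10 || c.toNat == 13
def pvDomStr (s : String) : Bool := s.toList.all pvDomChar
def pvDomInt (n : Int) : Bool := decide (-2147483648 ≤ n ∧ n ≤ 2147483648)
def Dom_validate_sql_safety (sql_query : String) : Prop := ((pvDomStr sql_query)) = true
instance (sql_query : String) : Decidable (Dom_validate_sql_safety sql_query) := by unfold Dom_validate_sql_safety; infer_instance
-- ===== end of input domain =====

-- B makes one left-to-right pass over the uppercased query, testing at each position
-- whether any dangerous keyword starts there, instead of A's one whole-string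
-- substring search per keyword.

-- ===== PORT A =====
def pvDangerousKeywords : List String :=
  ["DROP", "DELETE", "INSERT", "UPDATE", "ALTER",
   "CREATE", "TRUNCATE", "REPLACE", "ATTACH", "DETACH"]

-- the 'for keyword in dangerous_keywords: if keyword in sql_upper: return False' loop
def pvLoopA : List String → String → Bool
  | [], _ => true
  | k :: rest, su => if PySem.Str.isIn k su then false else pvLoopA rest su

def validate_sql_safety (sql_query : String) : Bool :=
  let sql_upper := PySem.Str.upper sql_query
  pvLoopA pvDangerousKeywords sql_upper

-- ===== PORT B =====
def pvKeywordChars : List (List Char) :=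
  ["DROP".toList, "DELETE".toList, "INSERT".toList, "UPDATE".toList, "ALTER".toList,
   "CREATE".toList, "TRUNCATE".toList, "REPLACE".toList, "ATTACH".toList, "DETACH".toList]

def validate_sql_safety_alt (sql_query : String) : Bool :=
  let s := PySem.Chars.upper sql_query.toList
  !((List.range s.length).any (fun i =>
      pvKeywordChars.any (fun kw => PySem.Chars.startswith (s.drop i) kw)))

-- ===== PRECONDITION & SPEC =====
def Spec_validate_sql_safety (sql_query : String) (out : Bool) : Prop := out = validate_sql_safety_alt sql_query
instance (sql_query : String) (out : Bool) : Decidable (Spec_validate_sql_safety sql_query out) := by unfold Spec_validate_sql_safety; infer_instance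

-- ===== CLAIM (what is proved, stated in full; the proofs are below) =====
def Claim_equal_validate_sql_safety : Prop := ∀ (sql_query : String), Dom_validate_sql_safety sql_query → Spec_validate_sql_safety sql_query (validate_sql_safety sql_query)

-- ===== LEMMAS AND PROOFS =====

theorem pvLoopA_eq_any (ks : List String) (su : String) :
    pvLoopA ks su = !(ks.any (fun k => PySem.Str.isIn k su)) := by
  induction ks with
  | nil => rfl
  | cons k rest ih =>
    simp only [pvLoopA, ih, List.any_cons]
    cases h : PySem.Str.isIn k su <;> simp

-- one keyword: 'kw in s' ↔ kw starts at some position i < s.length (kw nonempty)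
theorem pvKey (s kw : List Char) (h : kw ≠ []) :
    (List.range s.length).any (fun i => PySem.Chars.startswith (s.drop i) kw)
      = PySem.Chars.isIn kw s := by
  rcases hb : PySem.Chars.isIn kw s with _ | _
  · rw [PySem.Chars.isIn_eq_false_iff] at hb
    rw [List.any_eq_false]
    intro i _ hs
    exact hb (List.infix_iff_prefix_suffix.2
        ⟨s.drop i, (PySem.Chars.startswith_iff _ _).1 hs, List.drop_suffix i s⟩)
  · have := (PySem.Chars.exists_prefix_drop_iff_isIn kw s).2 hb
    obtain ⟨j, hj⟩ := this
    have hjlt : j < s.length := by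
      by_contra hge
      push Not at hge
      rw [List.drop_eq_nil_of_le hge] at hj
      exact h (List.prefix_nil.1 hj)
    simp only [List.any_eq_true, List.mem_range]
    exact ⟨j, hjlt, (PySem.Chars.startswith_iff _ _).2 hj⟩

-- ===== VERDICT (by name: the statement is the Claim_ definition above) =====
theorem validate_sql_safety_spec : Claim_equal_validate_sql_safety := by
  intro q _
  show validate_sql_safety q = validate_sql_safety_alt q
  unfold validate_sql_safety validate_sql_safety_alt
  rw [pvLoopA_eq_any]
  congr 1
  have hswap :
      ((List.range (PySem.Chars.upper q.toList).length).any (fun i =>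
        pvKeywordChars.any (fun kw =>
          PySem.Chars.startswith ((PySem.Chars.upper q.toList).drop i) kw)))
      = pvKeywordChars.any (fun kw =>
          (List.range (PySem.Chars.upper q.toList).length).any (fun i =>
            PySem.Chars.startswith ((PySem.Chars.upper q.toList).drop i) kw)) := by
    rw [Bool.eq_iff_iff]
    simp only [List.any_eq_true]
    constructor
    · rintro ⟨i, hi, kw, hkw, h⟩; exact ⟨kw, hkw, i, hi, h⟩
    · rintro ⟨kw, hkw, i, hi, h⟩; exact ⟨i, hi, kw, hkw, h⟩
  rw [hswap]
  simp only [pvDangerousKeywords, pvKeywordChars, List.any_cons, List.any_nil,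
    PySem.Str.isIn_eq, PySem.Str.toList_upper]
  rw [pvKey _ _ (by decide), pvKey _ _ (by decide), pvKey _ _ (by decide),
      pvKey _ _ (by decide), pvKey _ _ (by decide), pvKey _ _ (by decide),
      pvKey _ _ (by decide), pvKey _ _ (by decide), pvKey _ _ (by decide),
      pvKey _ _ (by decide)]
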